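-- pv_equiv track=rewrite | github.com/juanaxyz/Tugas-PCD-2 | count_rice.py | filter_by_area
-- ===== SOURCE A (Python) =====
-- def filter_by_area(labels, min_area=50, max_area=5000):
--     """Filter components by area; labels is 2D list; return remapped 2D list of
--     sequential labels and count.
--     """
--     h = len(labels)
--     w = len(labels[0]) if h > 0 else 0
--     counts = {}
--     # count areas
--     for y in range(h):
--         for x in range(w):
--             lab = labels[y][x]
--             if lab == 0:
--                 continue
--             # hitung jumlah komponen berdasarkan key label
--             counts[lab] = counts.get(lab, 0) + 1
--
--     # tentukan label yang valid berdasarkan area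
--     valid_labels = {lab for lab, cnt in counts.items() if min_area <=
--                     cnt <= max_area}
--     new_label_map = {}
--     new_label = 0
--     filtered = [[0 for _ in range(w)] for _ in range(h)]
--
--     for lab in sorted(valid_labels):
--         new_label += 1
--         new_label_map[lab] = new_label
--
--     for y in range(h):
--         for x in range(w):
--             lab = labels[y][x]
--             if lab in new_label_map:
--                 filtered[y][x] = new_label_map[lab]
--
--     return filtered, new_label
-- ===== SOURCE B (Python) =====
-- def filter_by_area(labels, min_area=50, max_area=5000):
--     """Filter components by area; labels is 2D list; return remapped 2D list of
--     sequential labels and count.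
--     Different data structure: one scan records each label's coordinate list;
--     the area is the list's length, and valid components are painted directly
--     at their stored coordinates (no second full-grid scan, no remap dict).
--     """
--     h = len(labels)
--     w = len(labels[0]) if h > 0 else 0
--     positions = {}
--     for y in range(h):
--         for x in range(w):
--             lab = labels[y][x]
--             if lab != 0:
--                 positions.setdefault(lab, []).append((y, x))
--     out = [[0] * w for _ in range(h)]
--     new_label = 0
--     for lab in sorted(positions):
--         coords = positions[lab]
--         if min_area <= len(coords) <= max_area:
--             new_label += 1
--             for y, x in coords:
--                 out[y][x] = new_label
--     return out, new_label
-- ===== Notes on version B (the rewrite author's own statement) =====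
-- stated objective: alternative
-- what changed: B records each label's coordinate list in one scan (area = list length) and paints valid components directly at their stored coordinates while numbering them, instead of A's count dict, valid-label set, remap dict and second full-grid rewrite scan.
import Mathlib
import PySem

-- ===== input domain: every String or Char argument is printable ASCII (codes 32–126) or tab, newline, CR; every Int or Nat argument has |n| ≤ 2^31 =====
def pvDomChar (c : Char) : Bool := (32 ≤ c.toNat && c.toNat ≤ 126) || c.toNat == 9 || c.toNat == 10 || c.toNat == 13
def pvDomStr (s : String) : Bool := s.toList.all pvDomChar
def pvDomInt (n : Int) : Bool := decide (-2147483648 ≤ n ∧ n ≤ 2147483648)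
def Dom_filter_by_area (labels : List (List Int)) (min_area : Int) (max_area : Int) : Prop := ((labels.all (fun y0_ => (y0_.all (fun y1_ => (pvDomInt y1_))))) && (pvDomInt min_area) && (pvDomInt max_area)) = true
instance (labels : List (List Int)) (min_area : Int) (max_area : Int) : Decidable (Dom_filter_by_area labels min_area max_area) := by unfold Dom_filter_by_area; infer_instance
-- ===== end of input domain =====

-- B records each label's coordinate list in one scan (the area is the list's length) and
-- paints valid components directly at their stored coordinates while numbering them,
-- instead of A's count dict, remap dict and second full-grid rewrite scan (objective: alternative).

-- ===== PORT A =====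
def filter_by_area (labels : List (List Int)) (min_area : Int) (max_area : Int) : List (List Int) × Int :=
  let h : Int := PySem.List.len labels
  let w : Int := if h > 0 then PySem.List.len (PySem.List.pyGetD labels 0 []) else 0
  let counts : PySem.Dict Int Int :=
    (PySem.List.pyRange 0 h).foldl (fun d y =>
      (PySem.List.pyRange 0 w).foldl (fun d x =>
        let lab := PySem.List.pyGetD (PySem.List.pyGetD labels y []) x 0
        if lab = 0 then d else d.insert lab (d.getD lab 0 + 1)) d) PySem.Dict.empty
  let valid_labels : PySem.Set Int :=
    PySem.Set.ofList ((counts.items.filter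
      (fun p => decide (min_area ≤ p.2) && decide (p.2 ≤ max_area))).map (·.1))
  let st := (PySem.List.sorted valid_labels (fun x => x)).foldl
      (fun (p : Int × PySem.Dict Int Int) lab => (p.1 + 1, p.2.insert lab (p.1 + 1)))
      (0, PySem.Dict.empty)
  let new_label := st.1
  let new_label_map := st.2
  let filtered0 : List (List Int) :=
    (PySem.List.pyRange 0 h).map (fun _ => (PySem.List.pyRange 0 w).map (fun _ => (0 : Int)))
  let filtered := (PySem.List.pyRange 0 h).foldl (fun g y =>
      (PySem.List.pyRange 0 w).foldl (fun g x =>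
        let lab := PySem.List.pyGetD (PySem.List.pyGetD labels y []) x 0
        if new_label_map.contains lab then
          PySem.List.pySetD g y (PySem.List.pySetD (PySem.List.pyGetD g y []) x (new_label_map.getD lab 0))
        else g) g) filtered0
  (filtered, new_label)

-- ===== PORT B =====
def filter_by_area_alt (labels : List (List Int)) (min_area : Int) (max_area : Int) : List (List Int) × Int :=
  let h : Int := PySem.List.len labels
  let w : Int := if h > 0 then PySem.List.len (PySem.List.pyGetD labels 0 []) else 0
  let positions : PySem.Dict Int (List (Int × Int)) :=
    (PySem.List.pyRange 0 h).foldl (fun d y =>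
      (PySem.List.pyRange 0 w).foldl (fun d x =>
        let lab := PySem.List.pyGetD (PySem.List.pyGetD labels y []) x 0
        -- positions.setdefault(lab, []).append((y, x)) is exactly modify lab [] (· ++ [(y, x)])
        if lab ≠ 0 then d.modify lab [] (· ++ [(y, x)]) else d) d) PySem.Dict.empty
  let out0 : List (List Int) :=
    (PySem.List.pyRange 0 h).map (fun _ => PySem.List.pyRepeat [(0 : Int)] w)
  let st := (PySem.List.sorted positions.keys (fun x => x)).foldl
      (fun (p : Int × List (List Int)) lab =>
        let coords := positions.getD lab []
        if min_area ≤ PySem.List.len coords ∧ PySem.List.len coords ≤ max_area then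
          let n := p.1 + 1
          (n, coords.foldl (fun g c =>
            PySem.List.pySetD g c.1 (PySem.List.pySetD (PySem.List.pyGetD g c.1 []) c.2 n)) p.2)
        else p) (0, out0)
  (st.2, st.1)

-- ===== PRECONDITION & SPEC =====
-- Pre_ excludes exactly the inputs on which A raises IndexError: some row shorter than the
-- first row (A reads labels[y][x] for all x < len(labels[0])).
def Pre_filter_by_area (labels : List (List Int)) (min_area : Int) (max_area : Int) : Prop :=
  ∀ row ∈ labels, (labels.headD []).length ≤ row.length
instance (labels : List (List Int)) (min_area : Int) (max_area : Int) : Decidable (Pre_filter_by_area labels min_area max_area) := by unfold Pre_filter_by_area; infer_instance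

def pvWitness_filter_by_area : List (List Int) × Int × Int := ([[7], [7]], 1, 5)

def Spec_filter_by_area (labels : List (List Int)) (min_area : Int) (max_area : Int) (out : List (List Int) × Int) : Prop := out = filter_by_area_alt labels min_area max_area
instance (labels : List (List Int)) (min_area : Int) (max_area : Int) (out : List (List Int) × Int) : Decidable (Spec_filter_by_area labels min_area max_area out) := by unfold Spec_filter_by_area; infer_instance

-- ===== CLAIM (what is proved, stated in full; the proofs are below) =====
def Claim_equal_filter_by_area : Prop := ∀ (labels : List (List Int)) (min_area : Int) (max_area : Int), Dom_filter_by_area labels min_area max_area → Pre_filter_by_area labels min_area max_area → Spec_filter_by_area labels min_area max_area (filter_by_area labels min_area max_area)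

-- ===== LEMMAS AND PROOFS =====

-- the nonzero cells of the grid, row-major, as (label, (y, x)) pairs (B's scan stream)
def pvCells (labels : List (List Int)) (wn : Nat) : List (Int × (Int × Int)) :=
  (List.range labels.length).flatMap (fun yn =>
    ((List.range wn).map (fun xn =>
      ((labels.getD yn []).getD xn 0, ((yn : Int), (xn : Int))))).filter (fun p => decide (p.1 ≠ 0)))

-- the coordinates of label l, row-major
def pvCoords (labels : List (List Int)) (wn : Nat) (l : Int) : List (Int × Int) :=
  (List.range labels.length).flatMap (fun yn =>
    ((List.range wn).filter (fun xn => (labels.getD yn []).getD xn 0 == l)).map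
      (fun xn => ((yn : Int), (xn : Int))))

-- the grid as a function of a remap dict
def pvF (labels : List (List Int)) (wn : Nat) (d : PySem.Dict Int Int) : List (List Int) :=
  labels.map (fun row => (row.take wn).map (fun lab => d.getD lab 0))

-- reading row prefixes through integer indices is taking the prefix
lemma pv_map_getD_range (row : List Int) (wn : Nat) (h : wn ≤ row.length) :
    (List.range wn).map (fun k => row.getD k 0) = row.take wn := by
  apply List.ext_getElem?
  intro i
  by_cases hi : i < wn
  · simp [hi, List.getElem?_eq_getElem (lt_of_lt_of_le hi h)]
  · simp [hi]

-- pointwise value of a loop writing independent cells of one row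
lemma pv_foldl_set_getElem? (cond : Nat → Bool) (v : Nat → Int) :
    ∀ (ks : List Nat) (r : List Int) (i : Nat),
      (ks.foldl (fun r k => if cond k then r.set k (v k) else r) r)[i]? =
      if i ∈ ks ∧ cond i then (if i < r.length then some (v i) else none) else r[i]? := by
  intro ks
  induction ks with
  | nil => intro r i; simp
  | cons k t ih =>
      intro r i
      simp only [List.foldl_cons]
      rw [ih]
      by_cases hci : cond i
      · by_cases hit : i ∈ t
        · by_cases hck : cond k <;> simp [hci, hit, hck]
        · by_cases hik : i = k
          · subst hik
            simp [hci, hit, List.getElem?_set]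
          · simp only [List.mem_cons, hit, or_false]
            by_cases hck : cond k <;> simp [hci, hik, hck, Ne.symm hik]
      · by_cases hck : cond k
        · simp [hci, hck, show k ≠ i from fun h => hci (h ▸ hck)]
        · simp [hci, hck]

-- a row-update loop at a fixed row index only rewrites that row
lemma pv_inner_set_row (cond : Nat → Bool) (v : Nat → Int) (yn : Nat) :
    ∀ (ks : List Nat) (g : List (List Int)),
      ks.foldl (fun g k => if cond k then g.set yn ((g.getD yn []).set k (v k)) else g) g =
      g.set yn (ks.foldl (fun r k => if cond k then r.set k (v k) else r) (g.getD yn [])) := by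
  intro ks
  induction ks with
  | nil =>
      intro g
      simp only [List.foldl_nil]
      by_cases hy : yn < g.length
      · rw [List.getD_eq_getElem _ _ hy, List.set_getElem_self hy]
      · rw [List.set_eq_of_length_le (le_of_not_gt hy)]
  | cons k t ih =>
      intro g
      simp only [List.foldl_cons]
      by_cases hck : cond k
      · simp only [hck, if_true]
        rw [ih]
        by_cases hy : yn < g.length
        · rw [List.set_set, List.getD_eq_getElem _ _ (by simpa using hy),
            List.getElem_set_self (by simpa using hy)]
        · simp [List.set_eq_of_length_le (le_of_not_gt hy)]
      · simp only [hck, Bool.false_eq_true, if_false]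
        exact ih g

-- pointwise value of a loop rewriting whole rows at distinct indices
lemma pv_foldl_setrow_getElem? (T : Nat → List Int → List Int) :
    ∀ (ys : List Nat) (g : List (List Int)) (i : Nat), ys.Nodup →
      (ys.foldl (fun g y => g.set y (T y (g.getD y []))) g)[i]? =
      if i ∈ ys then (if i < g.length then some (T i (g.getD i [])) else none) else g[i]? := by
  intro ys
  induction ys with
  | nil => intro g i _; simp
  | cons y t ih =>
      intro g i hnd
      simp only [List.foldl_cons]
      rw [ih _ _ (List.Nodup.of_cons hnd)]
      have hyt : y ∉ t := (List.nodup_cons.mp hnd).1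
      by_cases hit : i ∈ t
      · have hiy : i ≠ y := fun h => hyt (h ▸ hit)
        simp [hit, hiy, List.getD_eq_getElem?_getD, Ne.symm hiy]
      · by_cases hiy : i = y
        · subst hiy
          simp [hit, List.getElem?_set]
        · simp [hit, hiy, Ne.symm hiy]

-- skipping zeros while folding is folding the filtered list
lemma pv_foldl_skip_zero {β : Type} (g : β → Int → β) :
    ∀ (l : List Int) (b : β),
      l.foldl (fun d x => if x = 0 then d else g d x) b =
      (l.filter (fun x => decide (x ≠ 0))).foldl g b := by
  intro l b
  rw [List.foldl_filter]
  congr 1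
  funext d x
  by_cases hx : x = 0 <;> simp [hx]

lemma pv_inner_read {β : Type} (step : β → Int → β) (row : List Int) (wn : Nat)
    (h : wn ≤ row.length) (d : β) :
    (PySem.List.pyRange 0 (wn : Int)).foldl (fun d x => step d (PySem.List.pyGetD row x 0)) d =
    (row.take wn).foldl step d := by
  rw [PySem.List.pyRange_zero_natCast, List.foldl_map]
  simp only [PySem.List.pyGetD_natCast]
  rw [← pv_map_getD_range row wn h, List.foldl_map]

lemma pv_A_counts (labels : List (List Int)) (wn : Nat) (hw : ∀ row ∈ labels, wn ≤ row.length) :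
    (PySem.List.pyRange 0 (PySem.List.len labels)).foldl (fun d y =>
      (PySem.List.pyRange 0 (wn : Int)).foldl (fun d x =>
        let lab := PySem.List.pyGetD (PySem.List.pyGetD labels y []) x 0
        if lab = 0 then d else d.insert lab (d.getD lab 0 + 1)) d) PySem.Dict.empty
    = PySem.Dict.counter (labels.flatMap (fun row => (row.take wn).filter (fun x => decide (x ≠ 0)))) := by
  rw [← PySem.Dict.foldl_insert_getD_add_one_eq_counter, List.foldl_flatMap]
  conv_rhs => rw [← PySem.List.map_pyGetD_pyRange_zero labels ([] : List Int), List.foldl_map]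
  apply PySem.List.foldl_congr_mem
  intro d y hy
  have hmem : PySem.List.pyGetD labels y [] ∈ labels := by
    apply PySem.List.pyGetD_mem
    rw [PySem.List.mem_pyRange_one] at hy
    constructor <;> simp [PySem.List.len_eq] at hy ⊢ <;> omega
  rw [pv_inner_read (fun d lab => if lab = 0 then d else d.insert lab (d.getD lab 0 + 1))
        (PySem.List.pyGetD labels y []) wn (hw _ hmem) d]
  exact pv_foldl_skip_zero _ _ _

lemma pv_A_grid (labels : List (List Int)) (wn : Nat) (d : PySem.Dict Int Int)
    (hw : ∀ row ∈ labels, wn ≤ row.length) :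
    (PySem.List.pyRange 0 (PySem.List.len labels)).foldl (fun g y =>
      (PySem.List.pyRange 0 (wn : Int)).foldl (fun g x =>
        if d.contains (PySem.List.pyGetD (PySem.List.pyGetD labels y []) x 0) then
          PySem.List.pySetD g y (PySem.List.pySetD (PySem.List.pyGetD g y []) x
            (d.getD (PySem.List.pyGetD (PySem.List.pyGetD labels y []) x 0) 0))
        else g) g)
      ((PySem.List.pyRange 0 (PySem.List.len labels)).map (fun _ =>
        (PySem.List.pyRange 0 (wn : Int)).map (fun _ => (0 : Int))))
    = pvF labels wn d := by
  unfold pvF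
  have hz : (PySem.List.pyRange 0 (wn : Int)).map (fun _ => (0 : Int)) = List.replicate wn 0 := by
    simp [PySem.List.pyRange_zero_natCast, List.map_map, Function.comp_def, List.map_const']
  have hg0 : (PySem.List.pyRange 0 (PySem.List.len labels)).map (fun _ =>
      (PySem.List.pyRange 0 (wn : Int)).map (fun _ => (0 : Int))) =
      List.replicate labels.length (List.replicate wn 0) := by
    rw [hz]
    simp [PySem.List.len_eq, PySem.List.pyRange_zero_natCast, List.map_map, Function.comp_def,
      List.map_const']
  rw [hg0]
  simp only [PySem.List.len_eq, PySem.List.pyRange_zero_natCast, List.foldl_map,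
    PySem.List.pyGetD_natCast, PySem.List.pySetD_natCast]
  have hstep : (fun (g : List (List Int)) (yn : Nat) =>
      (List.range wn).foldl (fun g kn =>
        if d.contains ((labels.getD yn []).getD kn 0) then
          g.set yn ((g.getD yn []).set kn (d.getD ((labels.getD yn []).getD kn 0) 0))
        else g) g) =
      (fun g yn => g.set yn ((List.range wn).foldl (fun r kn =>
        if d.contains ((labels.getD yn []).getD kn 0) then
          r.set kn (d.getD ((labels.getD yn []).getD kn 0) 0)
        else r) (g.getD yn []))) := by
    funext g yn
    exact pv_inner_set_row (fun kn => d.contains ((labels.getD yn []).getD kn 0))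
      (fun kn => d.getD ((labels.getD yn []).getD kn 0) 0) yn (List.range wn) g
  rw [hstep]
  apply List.ext_getElem?
  intro i
  rw [pv_foldl_setrow_getElem? (fun yn r => (List.range wn).foldl (fun r kn =>
        if d.contains ((labels.getD yn []).getD kn 0) then
          r.set kn (d.getD ((labels.getD yn []).getD kn 0) 0)
        else r) r) (List.range labels.length) _ i List.nodup_range]
  by_cases hi : i < labels.length
  · have hrow : labels.getD i [] = labels[i] := List.getD_eq_getElem labels [] hi
    have hwle : wn ≤ labels[i].length := hw _ (List.getElem_mem hi)
    simp only [List.mem_range, hi, if_true, List.length_replicate, List.getD_replicate,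
      List.getElem?_map, List.getElem?_eq_getElem hi, Option.map_some]
    refine congrArg some ?_
    apply List.ext_getElem?
    intro j
    rw [pv_foldl_set_getElem? _ _ (List.range wn) _ j]
    by_cases hj : j < wn
    · have hjr : j < labels[i].length := lt_of_lt_of_le hj hwle
      simp only [List.mem_range, hj, true_and, List.length_replicate, if_true]
      rw [hrow]
      have hget : (labels[i]).getD j 0 = labels[i][j] := List.getD_eq_getElem _ _ hjr
      rw [hget]
      have htake : ((labels[i].take wn).map (fun lab => d.getD lab 0))[j]? =
          some (d.getD labels[i][j] 0) := by
        simp [hj, List.getElem?_eq_getElem hjr]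
      rw [htake]
      by_cases hc : d.contains labels[i][j]
      · simp [hc]
      · simp only [Bool.not_eq_true] at hc
        simp [hc, PySem.Dict.getD_of_not_contains _ _ hc, hj]
    · simp only [List.mem_range, hj, false_and, if_false]
      have h1 : (List.replicate wn (0 : Int))[j]? = none := by
        simp; omega
      have h2 : ((labels[i].take wn).map (fun lab => d.getD lab 0))[j]? = none := by
        simp [List.length_take]; omega
      rw [h1, h2]
  · simp only [List.mem_range, hi, if_false]
    have h1 : (List.replicate labels.length (List.replicate wn (0:Int)))[i]? = none := by
      simp; omega
    have h2 : ((labels.map (fun row => (row.take wn).map (fun lab => d.getD lab 0))))[i]? = none := by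
      simp; omega
    rw [h1, h2]

-- B's first loop builds exactly the grouping fold over the nonzero-cell stream
lemma pv_B_positions (labels : List (List Int)) (wn : Nat) :
    (PySem.List.pyRange 0 (PySem.List.len labels)).foldl (fun d y =>
      (PySem.List.pyRange 0 (wn : Int)).foldl (fun d x =>
        let lab := PySem.List.pyGetD (PySem.List.pyGetD labels y []) x 0
        if lab ≠ 0 then d.modify lab [] (· ++ [(y, x)]) else d) d) PySem.Dict.empty
    = (pvCells labels wn).foldl (fun d p => d.modify p.1 [] (· ++ [p.2])) PySem.Dict.empty := by
  unfold pvCells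
  rw [List.foldl_flatMap]
  simp only [PySem.List.len_eq, PySem.List.pyRange_zero_natCast, List.foldl_map,
    PySem.List.pyGetD_natCast]
  apply PySem.List.foldl_congr_mem
  intro d yn _
  conv_rhs => rw [List.foldl_filter, List.foldl_map]
  simp only [decide_eq_true_eq]

-- the label stream of the cells is A's flattened nonzero-label stream
lemma pv_cells_map_fst (labels : List (List Int)) (wn : Nat)
    (hw : ∀ row ∈ labels, wn ≤ row.length) :
    (pvCells labels wn).map (·.1)
      = labels.flatMap (fun row => (row.take wn).filter (fun x => decide (x ≠ 0))) := by
  unfold pvCells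
  rw [List.map_flatMap]
  have hlab : (List.range labels.length).map (fun yn => labels.getD yn []) = labels :=
    List.ext_getElem? (by intro i; by_cases hi : i < labels.length <;> simp [hi])
  conv_rhs => rw [← hlab]
  rw [List.flatMap_def, List.flatMap_def, List.map_map]
  congr 1
  apply List.map_congr_left
  intro yn hyn
  rw [List.filter_map, List.map_map]
  have hmem : labels.getD yn [] ∈ labels := by
    simp only [List.mem_range] at hyn
    rw [List.getD_eq_getElem _ _ hyn]; exact List.getElem_mem hyn
  have := pv_map_getD_range (labels.getD yn []) wn (hw _ hmem)
  simp only [Function.comp_def]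
  rw [← this, List.filter_map]
  simp [Function.comp_def]

-- the stored coordinate list of a nonzero label is its genuine coordinate set, row-major
lemma pv_coords_getD (labels : List (List Int)) (wn : Nat) (l : Int) (hl : l ≠ 0) :
    ((pvCells labels wn).foldl (fun d p => d.modify p.1 [] (· ++ [p.2]))
        PySem.Dict.empty).getD l []
      = pvCoords labels wn l := by
  rw [PySem.Dict.getD_foldl_modify_append]
  unfold pvCells pvCoords
  rw [List.filter_flatMap, List.map_flatMap]
  simp only [PySem.Dict.getD_empty, List.nil_append]
  congr 1
  funext yn
  rw [List.filter_filter, List.filter_map, List.map_map]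
  have key : ∀ a : Int, (a == l && decide (a ≠ 0)) = (a == l) := by
    intro a
    by_cases h : a = l
    · subst h; simp [hl]
    · simp [h]
  have hfc : ∀ xn ∈ List.range wn,
      (((fun a : Int × (Int × Int) => a.1 == l && decide (a.1 ≠ 0)) ∘
        (fun xn => ((labels.getD yn []).getD xn 0, ((yn : Int), (xn : Int))))) xn)
      = ((labels.getD yn []).getD xn 0 == l) := fun xn _ => key _
  rw [List.filter_congr hfc]
  simp [Function.comp_def, List.map_flatMap]
  rw [← List.map_eq_flatMap]

-- the length of a stored coordinate list is the label's count in the flat stream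
lemma pv_coords_len (labels : List (List Int)) (wn : Nat)
    (hw : ∀ row ∈ labels, wn ≤ row.length) (l : Int) :
    (((pvCells labels wn).foldl (fun d p => d.modify p.1 [] (· ++ [p.2]))
        PySem.Dict.empty).getD l []).length
      = (labels.flatMap (fun row => (row.take wn).filter (fun x => decide (x ≠ 0)))).count l := by
  rw [PySem.Dict.getD_foldl_modify_append]
  rw [← pv_cells_map_fst labels wn hw]
  simp only [PySem.Dict.getD_empty, List.nil_append, List.length_map]
  rw [List.count_eq_countP, List.countP_map, ← List.countP_eq_length_filter]
  rfl

-- filtering after sorting a duplicate-free Int list is sorting the filtered list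
lemma pv_sorted_filter (K : List Int) (hnd : K.Nodup) (q : Int → Bool) :
    (PySem.List.sorted K (fun x => x)).filter q = PySem.List.sorted (K.filter q) (fun x => x) := by
  apply (PySem.List.sorted_eq_of_perm_of_pairwise_lt _ _ _ _ _).symm
  · exact (PySem.List.sorted_perm K (fun x => x) false).filter q
  · have hp : (PySem.List.sorted K (fun x => x)).Pairwise (· ≤ ·) :=
      PySem.List.sorted_pairwise K (fun x => x)
    have hn : (PySem.List.sorted K (fun x => x)).Nodup :=
      ((PySem.List.sorted_perm K (fun x => x) false).nodup_iff).mpr hnd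
    have hlt : (PySem.List.sorted K (fun x => x)).Pairwise (· < ·) :=
      (hp.and hn).imp (fun h => lt_of_le_of_ne h.1 h.2)
    exact hlt.filter q

-- painting one label's coordinates with v performs the dict insert, seen through pvF
lemma pv_paint (labels : List (List Int)) (wn : Nat)
    (hw : ∀ row ∈ labels, wn ≤ row.length) (l v : Int) (d : PySem.Dict Int Int) :
    (pvCoords labels wn l).foldl (fun g c =>
        PySem.List.pySetD g c.1 (PySem.List.pySetD (PySem.List.pyGetD g c.1 []) c.2 v))
      (pvF labels wn d)
    = pvF labels wn (d.insert l v) := by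
  unfold pvCoords pvF
  rw [List.foldl_flatMap]
  simp only [List.pure_def, List.bind_eq_flatMap]
  simp only [← List.map_eq_flatMap]
  simp only [List.foldl_map, PySem.List.pySetD_natCast, PySem.List.pyGetD_natCast]
  have hstep : (fun (g : List (List Int)) (yn : Nat) =>
      ((List.range wn).filter (fun xn => (labels.getD yn []).getD xn 0 == l)).foldl
        (fun g xn => g.set yn ((g.getD yn []).set xn v)) g) =
      (fun g yn => g.set yn ((List.range wn).foldl (fun r xn =>
        if (labels.getD yn []).getD xn 0 == l then r.set xn v else r) (g.getD yn []))) := by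
    funext g yn
    rw [List.foldl_filter]
    exact pv_inner_set_row (fun xn => (labels.getD yn []).getD xn 0 == l) (fun _ => v) yn
      (List.range wn) g
  rw [hstep]
  apply List.ext_getElem?
  intro i
  rw [pv_foldl_setrow_getElem? (fun yn r => (List.range wn).foldl (fun r xn =>
        if (labels.getD yn []).getD xn 0 == l then r.set xn v else r) r)
      (List.range labels.length) _ i List.nodup_range]
  by_cases hi : i < labels.length
  · have hrow : labels.getD i [] = labels[i] := List.getD_eq_getElem labels [] hi
    have hwle : wn ≤ labels[i].length := hw _ (List.getElem_mem hi)
    have hgetrow : (labels.map (fun row => (row.take wn).map (fun lab => d.getD lab 0))).getD i []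
        = (labels[i].take wn).map (fun lab => d.getD lab 0) := by
      rw [List.getD_eq_getElem _ _ (by simpa using hi), List.getElem_map]
    simp only [List.mem_range, hi, if_true, List.length_map, List.getElem?_map,
      List.getElem?_eq_getElem hi, Option.map_some, hgetrow]
    refine congrArg some ?_
    apply List.ext_getElem?
    intro j
    rw [pv_foldl_set_getElem? _ _ (List.range wn) _ j]
    by_cases hj : j < wn
    · have hjr : j < labels[i].length := lt_of_lt_of_le hj hwle
      have hlen : ((labels[i].take wn).map (fun lab => d.getD lab 0)).length = wn := by
        simp [List.length_take, Nat.min_eq_left hwle]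
      simp only [List.mem_range, hj, true_and, hlen, if_true, hrow]
      have hget : (labels[i]).getD j 0 = labels[i][j] := List.getD_eq_getElem _ _ hjr
      rw [hget]
      have htake : ∀ e : PySem.Dict Int Int, ((labels[i].take wn).map (fun lab => e.getD lab 0))[j]? =
          some (e.getD labels[i][j] 0) := by
        intro e
        simp [hj, List.getElem?_eq_getElem hjr]
      rw [htake d, htake (d.insert l v)]
      rw [PySem.Dict.getD_insert]
      by_cases hc : labels[i][j] = l
      · simp [hc]
      · simp [hc]
    · simp only [List.mem_range, hj, false_and, if_false]
      have h1 : ((labels[i].take wn).map (fun lab => d.getD lab 0))[j]? = none := by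
        simp [List.length_take]; omega
      have h2 : ((labels[i].take wn).map (fun lab => (d.insert l v).getD lab 0))[j]? = none := by
        simp [List.length_take]; omega
      rw [h1, h2]
  · simp only [List.mem_range, hi, if_false]
    have h1 : ((labels.map (fun row => (row.take wn).map (fun lab => d.getD lab 0))))[i]? = none := by
      simp; omega
    have h2 : ((labels.map (fun row => (row.take wn).map (fun lab => (d.insert l v).getD lab 0))))[i]? = none := by
      simp; omega
    rw [h1, h2]

-- B's numbering-and-painting loop tracks A's numbering-and-remap loop through pvF
lemma pv_paintfold (labels : List (List Int)) (wn : Nat)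
    (hw : ∀ row ∈ labels, wn ≤ row.length) :
    ∀ (V : List Int) (n : Int) (d : PySem.Dict Int Int),
      V.foldl (fun (p : Int × List (List Int)) lab =>
          (p.1 + 1, (pvCoords labels wn lab).foldl (fun g c =>
            PySem.List.pySetD g c.1 (PySem.List.pySetD (PySem.List.pyGetD g c.1 []) c.2 (p.1 + 1))) p.2))
        (n, pvF labels wn d)
      = ((V.foldl (fun (p : Int × PySem.Dict Int Int) lab => (p.1 + 1, p.2.insert lab (p.1 + 1))) (n, d)).1,
         pvF labels wn (V.foldl (fun (p : Int × PySem.Dict Int Int) lab => (p.1 + 1, p.2.insert lab (p.1 + 1))) (n, d)).2) := by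
  intro V
  induction V with
  | nil => intro n d; rfl
  | cons l t ih =>
      intro n d
      simp only [List.foldl_cons]
      rw [pv_paint labels wn hw l (n + 1) d]
      exact ih (n + 1) (d.insert l (n + 1))

-- B's zero grid is pvF of the empty dict
lemma pv_out0 (labels : List (List Int)) (wn : Nat)
    (hw : ∀ row ∈ labels, wn ≤ row.length) :
    (PySem.List.pyRange 0 (PySem.List.len labels)).map (fun _ => PySem.List.pyRepeat [(0 : Int)] (wn : Int))
      = pvF labels wn PySem.Dict.empty := by
  unfold pvF
  have hrow : ∀ row ∈ labels,
      (row.take wn).map (fun lab => (PySem.Dict.empty : PySem.Dict Int Int).getD lab 0)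
      = List.replicate wn (0 : Int) := by
    intro row hr
    simp [PySem.Dict.getD_empty, List.map_const', Nat.min_eq_left (hw _ hr)]
  rw [List.map_congr_left hrow]
  simp [PySem.List.len_eq, PySem.List.pyRange_zero_natCast, PySem.List.pyRepeat_singleton,
    List.map_const', List.map_map, Function.comp_def]


-- B's validity test extracted as a filter (first-order instance of foldl_ite_eq_foldl_filter)
lemma pv_B_filter_step (P : PySem.Dict Int (List (Int × Int))) (mn mx : Int) (L : List Int)
    (init : Int × List (List Int)) :
    L.foldl (fun p lab =>
        if mn ≤ PySem.List.len (P.getD lab []) ∧ PySem.List.len (P.getD lab []) ≤ mx then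
          (p.1 + 1, (P.getD lab []).foldl (fun g c =>
            PySem.List.pySetD g c.1 (PySem.List.pySetD (PySem.List.pyGetD g c.1 []) c.2 (p.1 + 1))) p.2)
        else p) init
    = (L.filter (fun lab => decide (mn ≤ PySem.List.len (P.getD lab []) ∧
        PySem.List.len (P.getD lab []) ≤ mx))).foldl (fun p lab =>
          (p.1 + 1, (P.getD lab []).foldl (fun g c =>
            PySem.List.pySetD g c.1 (PySem.List.pySetD (PySem.List.pyGetD g c.1 []) c.2 (p.1 + 1))) p.2)) init :=
  PySem.List.foldl_ite_eq_foldl_filter _ _ _ _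


-- B's numbering-and-painting loop over nonzero labels, resolved through pvF
lemma pv_B_loop (labels : List (List Int)) (wn : Nat)
    (hw : ∀ row ∈ labels, wn ≤ row.length) (V : List Int)
    (hV : ∀ lab ∈ V, lab ≠ 0) :
    V.foldl (fun (p : Int × List (List Int)) lab =>
        (p.1 + 1, (((pvCells labels wn).foldl (fun d p => d.modify p.1 [] (· ++ [p.2]))
            PySem.Dict.empty).getD lab []).foldl (fun g c =>
          PySem.List.pySetD g c.1 (PySem.List.pySetD (PySem.List.pyGetD g c.1 []) c.2 (p.1 + 1))) p.2))
      (0, pvF labels wn PySem.Dict.empty)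
    = ((V.foldl (fun (p : Int × PySem.Dict Int Int) lab => (p.1 + 1, p.2.insert lab (p.1 + 1))) (0, PySem.Dict.empty)).1,
       pvF labels wn (V.foldl (fun (p : Int × PySem.Dict Int Int) lab => (p.1 + 1, p.2.insert lab (p.1 + 1))) (0, PySem.Dict.empty)).2) := by
  have h1 : V.foldl (fun (p : Int × List (List Int)) lab =>
        (p.1 + 1, (((pvCells labels wn).foldl (fun d p => d.modify p.1 [] (· ++ [p.2]))
            PySem.Dict.empty).getD lab []).foldl (fun g c =>
          PySem.List.pySetD g c.1 (PySem.List.pySetD (PySem.List.pyGetD g c.1 []) c.2 (p.1 + 1))) p.2))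
      (0, pvF labels wn PySem.Dict.empty)
      = V.foldl (fun (p : Int × List (List Int)) lab =>
        (p.1 + 1, (pvCoords labels wn lab).foldl (fun g c =>
          PySem.List.pySetD g c.1 (PySem.List.pySetD (PySem.List.pyGetD g c.1 []) c.2 (p.1 + 1))) p.2))
      (0, pvF labels wn PySem.Dict.empty) := by
    apply PySem.List.foldl_congr_mem
    intro acc lab hm
    rw [pv_coords_getD labels wn lab (hV lab hm)]
  rw [h1]
  exact pv_paintfold labels wn hw V 0 PySem.Dict.empty

-- ===== VERDICT (by name: the statement is the Claim_ definition above) =====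
theorem filter_by_area_spec : Claim_equal_filter_by_area := by
  intro labels mn mx _ hpre
  show filter_by_area labels mn mx = filter_by_area_alt labels mn mx
  cases labels with
  | nil => rfl
  | cons r0 rest =>
    have hw : ∀ row ∈ r0 :: rest, r0.length ≤ row.length := by
      intro row hr
      simpa using hpre row hr
    have h1 : (if PySem.List.len (r0 :: rest) > 0 then
        PySem.List.len (PySem.List.pyGetD (r0 :: rest) 0 []) else 0) = (r0.length : Int) := by
      rw [if_pos (by simp [PySem.List.len_eq])]
      rw [PySem.List.pyGetD_zero]
      simp [PySem.List.len_eq]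
    simp only [filter_by_area, filter_by_area_alt, h1]
    rw [pv_A_counts (r0 :: rest) r0.length hw, pv_B_positions (r0 :: rest) r0.length,
      pv_out0 (r0 :: rest) r0.length hw]
    -- normalize A's sorted valid-label list
    rw [PySem.Dict.items_counter, List.filter_map, List.map_map]
    have hK : (PySem.Set.ofList ((r0 :: rest).flatMap
        (fun row => (row.take r0.length).filter (fun x => decide (x ≠ 0))))).Nodup :=
      PySem.Set.nodup_ofList _
    rw [show ((fun p : Int × Int => p.1) ∘ (fun k =>
        (k, (((r0 :: rest).flatMap (fun row => (row.take r0.length).filter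
          (fun x => decide (x ≠ 0)))).count k : Int)))) = (fun k : Int => k) from rfl]
    rw [List.map_id', PySem.Set.ofList_eq_self_of_nodup _ (hK.filter _)]
    simp only [Function.comp_def]
    -- normalize B's key list
    rw [PySem.Dict.keys_foldl_modify_key (pvCells (r0 :: rest) r0.length) (·.1) []
      (fun _ p => (· ++ [p.2])) PySem.Dict.empty]
    rw [PySem.Dict.keys_empty, PySem.Set.update_nil_left, pv_cells_map_fst (r0 :: rest) r0.length hw]
    -- extract B's validity filter out of the loop
    rw [pv_B_filter_step ((pvCells (r0 :: rest) r0.length).foldl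
      (fun d p => d.modify p.1 [] (· ++ [p.2])) PySem.Dict.empty) mn mx]
    have hqc : ∀ lab ∈ PySem.List.sorted (PySem.Set.ofList ((r0 :: rest).flatMap
        (fun row => (row.take r0.length).filter (fun x => decide (x ≠ 0))))) (fun x => x),
        (decide (mn ≤ PySem.List.len (((pvCells (r0 :: rest) r0.length).foldl
            (fun d p => d.modify p.1 [] (· ++ [p.2])) PySem.Dict.empty).getD lab []) ∧
          PySem.List.len (((pvCells (r0 :: rest) r0.length).foldl
            (fun d p => d.modify p.1 [] (· ++ [p.2])) PySem.Dict.empty).getD lab []) ≤ mx))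
        = (decide (mn ≤ ((((r0 :: rest).flatMap (fun row => (row.take r0.length).filter
            (fun x => decide (x ≠ 0)))).count lab : Nat) : Int)) &&
           decide ((((((r0 :: rest).flatMap (fun row => (row.take r0.length).filter
            (fun x => decide (x ≠ 0)))).count lab : Nat)) : Int) ≤ mx)) := by
      intro lab _
      rw [PySem.List.len_eq, pv_coords_len (r0 :: rest) r0.length hw lab]
      simp
    rw [List.filter_congr hqc,
      pv_sorted_filter (PySem.Set.ofList ((r0 :: rest).flatMap
        (fun row => (row.take r0.length).filter (fun x => decide (x ≠ 0))))) hK]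
    -- identify B's per-label coordinate lists and fold the painting loop
    rw [pv_B_loop (r0 :: rest) r0.length hw _ (by
      intro lab hm
      have h2 := ((PySem.List.sorted_perm _ (fun x : Int => x) false).mem_iff).mp hm
      have h3 := List.mem_of_mem_filter h2
      have h4 := (PySem.Set.mem_ofList _ _).mp h3
      rcases List.mem_flatMap.mp h4 with ⟨row, _, hr⟩
      simpa using (List.mem_filter.mp hr).2)]
    rw [pv_A_grid (r0 :: rest) r0.length _ hw]
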